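-- pv_equiv track=rewrite | github.com/zoologov/beadloom | src/beadloom/doc_sync/scanner.py | _has_modifier
-- ===== SOURCE A (Python) =====
-- _FP_MODIFIER_WORDS: frozenset[str] = frozenset({
--     "default", "defaults",
--     "max", "maximum", "min", "minimum",
--     "limit", "limits", "limited",
--     "cap", "capped", "caps",
--     "target", "targets", "targeting",
--     "threshold", "thresholds",
--     "about", "approximately",
--     "per",
--     "depth",
--     "days", "day", "hours", "hour", "minutes", "seconds",
-- })
--
-- _FP_MODIFIER_PHRASES: tuple[list[str], ...] = (
--     ["up", "to"],
--     ["at", "least"],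
--     ["at", "most"],
--     ["no", "more", "than"],
--     ["capped", "at"],
-- )
--
-- def _has_modifier(tokens: list[str]) -> bool:
--     """Check if any modifier word or phrase appears in the token window.
--
--     Layer 1 of false-positive reduction: numbers near modifiers like
--     'default', 'max', 'limit', 'per', 'about', etc. are configuration
--     parameters or thresholds, not factual claims.
--     """
--     # Single-word modifiers
--     if any(tok in _FP_MODIFIER_WORDS for tok in tokens):
--         return True
--
--     # Multi-word modifier phrases
--     for phrase in _FP_MODIFIER_PHRASES:
--         phrase_len = len(phrase)
--         for i in range(len(tokens) - phrase_len + 1):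
--             if all(tokens[i + j] == phrase[j] for j in range(phrase_len)):
--                 return True
--
--     return False
-- ===== SOURCE B (Python) =====
-- _FP_MODIFIER_WORDS = frozenset({
--     "default", "defaults",
--     "max", "maximum", "min", "minimum",
--     "limit", "limits", "limited",
--     "cap", "capped", "caps",
--     "target", "targets", "targeting",
--     "threshold", "thresholds",
--     "about", "approximately",
--     "per",
--     "depth",
--     "days", "day", "hours", "hour", "minutes", "seconds",
-- })
--
-- _FP_PAIRS = {("up", "to"), ("at", "least"), ("at", "most"), ("capped", "at")}
-- _FP_TRIPLES = {("no", "more", "than")}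
--
--
-- def _has_modifier(tokens):
--     for i in range(len(tokens)):
--         if (tokens[i] in _FP_MODIFIER_WORDS
--                 or tuple(tokens[i:i + 2]) in _FP_PAIRS
--                 or tuple(tokens[i:i + 3]) in _FP_TRIPLES):
--             return True
--     return False
-- ===== Notes on version B (the rewrite author's own statement) =====
-- stated objective: faster
-- what changed: A's word scan plus five separate per-phrase window scans are merged into one single pass over positions, looking up the token in the word set and the 2-/3-token slice in length-keyed tuple sets.
import Mathlib
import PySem

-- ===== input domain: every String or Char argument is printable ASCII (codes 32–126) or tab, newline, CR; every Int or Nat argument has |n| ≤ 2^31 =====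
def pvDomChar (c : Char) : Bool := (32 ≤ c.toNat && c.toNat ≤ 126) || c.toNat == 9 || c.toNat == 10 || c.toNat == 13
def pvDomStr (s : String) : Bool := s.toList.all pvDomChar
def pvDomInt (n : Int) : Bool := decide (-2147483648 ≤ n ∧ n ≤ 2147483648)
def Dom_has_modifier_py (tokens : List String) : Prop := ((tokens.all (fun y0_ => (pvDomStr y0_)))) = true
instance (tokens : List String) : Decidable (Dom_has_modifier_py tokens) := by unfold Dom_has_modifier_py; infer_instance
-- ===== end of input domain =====

-- B merges A's word scan and five per-phrase window scans into one single pass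
-- over positions with length-keyed phrase tables (measured faster by a constant factor).

-- ===== PORT A =====
def fpWords : List String :=
  ["default", "defaults", "max", "maximum", "min", "minimum",
   "limit", "limits", "limited", "cap", "capped", "caps",
   "target", "targets", "targeting", "threshold", "thresholds",
   "about", "approximately", "per", "depth",
   "days", "day", "hours", "hour", "minutes", "seconds"]

def fpPhrases : List (List String) :=
  [["up", "to"], ["at", "least"], ["at", "most"], ["no", "more", "than"], ["capped", "at"]]

def has_modifier_py (tokens : List String) : Bool :=
  -- if any(tok in _FP_MODIFIER_WORDS for tok in tokens): return True
  if tokens.any (fun tok => fpWords.contains tok) then true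
  else
    -- for phrase in _FP_MODIFIER_PHRASES: for i in range(len(tokens)-phrase_len+1):
    --   if all(tokens[i+j] == phrase[j] for j in range(phrase_len)): return True
    fpPhrases.any (fun phrase =>
      (PySem.List.pyRange 0 ((tokens.length : Int) - (phrase.length : Int) + 1) 1).any (fun i =>
        (PySem.List.pyRange 0 (phrase.length : Int) 1).all (fun j =>
          -- indices i+j and j are always in range here, so pyGetD is exact
          PySem.List.pyGetD tokens (i + j) "" == PySem.List.pyGetD phrase j "")))

-- ===== PORT B =====
-- (Python tuples of tokens are represented as List String)
def fpPairs : List (List String) :=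
  [["up", "to"], ["at", "least"], ["at", "most"], ["capped", "at"]]

def fpTriples : List (List String) := [["no", "more", "than"]]

def has_modifier_py_alt (tokens : List String) : Bool :=
  (PySem.List.pyRange 0 (tokens.length : Int) 1).any (fun i =>
    fpWords.contains (PySem.List.pyGetD tokens i "")
    || fpPairs.contains (PySem.List.slice tokens (some i) (some (i + 2)))
    || fpTriples.contains (PySem.List.slice tokens (some i) (some (i + 3))))

-- ===== PRECONDITION & SPEC =====
def Spec_has_modifier_py (tokens : List String) (out : Bool) : Prop := out = has_modifier_py_alt tokens
instance (tokens : List String) (out : Bool) : Decidable (Spec_has_modifier_py tokens out) := by unfold Spec_has_modifier_py; infer_instance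

-- ===== CLAIM (what is proved, stated in full; the proofs are below) =====
def Claim_equal_has_modifier_py : Prop := ∀ (tokens : List String), Dom_has_modifier_py tokens → Spec_has_modifier_py tokens (has_modifier_py tokens)

-- ===== LEMMAS AND PROOFS =====

-- the canonical meaning both programs compute: a modifier word occurs, or a
-- 2-token phrase window matches, or the 3-token phrase window matches
def Match2 (tokens : List String) (i : Nat) : Prop :=
  (tokens.drop i).take 2 = ["up", "to"] ∨ (tokens.drop i).take 2 = ["at", "least"] ∨
  (tokens.drop i).take 2 = ["at", "most"] ∨ (tokens.drop i).take 2 = ["capped", "at"]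

def Match3 (tokens : List String) (i : Nat) : Prop :=
  (tokens.drop i).take 3 = ["no", "more", "than"]

def Canon (tokens : List String) : Prop :=
  (∃ t ∈ tokens, fpWords.contains t = true) ∨ (∃ i, Match2 tokens i) ∨ (∃ i, Match3 tokens i)

-- the "all j" window test of A equals a slice equality (for a window fully inside)
theorem window_eq_slice (tokens p : List String) (i : Nat) (hle : i + p.length ≤ tokens.length) :
    ((PySem.List.pyRange 0 (p.length : Int) 1).all (fun j =>
        PySem.List.pyGetD tokens ((i : Int) + j) "" == PySem.List.pyGetD p j "")) =
      ((tokens.drop i).take p.length == p) := by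
  rw [Bool.eq_iff_iff]
  simp only [PySem.List.pyRange_one, List.all_map, List.all_eq_true, List.mem_range,
    Function.comp_apply, beq_iff_eq, sub_zero, Int.toNat_natCast, zero_add,
    ← Nat.cast_add, PySem.List.pyGetD_natCast]
  constructor
  · intro h
    apply List.ext_getElem
    · simp; omega
    · intro j hj hj'
      have hjp : j < p.length := by simpa using hj'
      have := h j hjp
      rw [List.getD_eq_getElem _ _ (by omega), List.getD_eq_getElem _ _ hjp] at this
      simpa [List.getElem_take, List.getElem_drop] using this
  · intro h j hj
    rw [List.getD_eq_getElem _ _ (by omega), List.getD_eq_getElem _ _ hj]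
    have : ((tokens.drop i).take p.length)[j]'(by simp; omega) = p[j]'hj := by
      simp [h]
    simpa [List.getElem_take, List.getElem_drop] using this

-- a matching window pins down the window's position inside the list
theorem match_le (tokens p : List String) (i : Nat) (hp : 0 < p.length)
    (h : (tokens.drop i).take p.length = p) : i + p.length ≤ tokens.length := by
  have := congrArg List.length h
  rw [List.length_take, List.length_drop] at this
  omega

-- A's index loop for a nonempty phrase finds exactly the positions where the slice matches
theorem loop_eq_exists (tokens p : List String) (hp : 0 < p.length) :
    (((PySem.List.pyRange 0 ((tokens.length : Int) - (p.length : Int) + 1) 1).any (fun i =>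
        (PySem.List.pyRange 0 (p.length : Int) 1).all (fun j =>
          PySem.List.pyGetD tokens (i + j) "" == PySem.List.pyGetD p j ""))) = true) ↔
      (∃ i : Nat, (tokens.drop i).take p.length = p) := by
  constructor
  · intro h
    rw [List.any_eq_true] at h
    obtain ⟨x, hx, hcond⟩ := h
    rw [PySem.List.mem_pyRange_one] at hx
    lift x to ℕ using hx.1 with k
    have hx2 := hx.2
    have hk : k + p.length ≤ tokens.length := by omega
    rw [window_eq_slice tokens p k hk] at hcond
    exact ⟨k, by simpa using hcond⟩
  · rintro ⟨i, hi⟩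
    have hlen := match_le tokens p i hp hi
    rw [List.any_eq_true]
    refine ⟨(i : Int), ?_, ?_⟩
    · rw [PySem.List.mem_pyRange_one]
      constructor
      · positivity
      · omega
    · rw [window_eq_slice tokens p i hlen]
      simpa using hi

-- a matching window of length m pins its position (length stated as a numeral)
theorem take_eq_bound (tokens q : List String) (m i : Nat) (h : (tokens.drop i).take m = q)
    (hq : q.length = m) (h0 : 0 < m) : i + m ≤ tokens.length := by
  have := congrArg List.length h
  rw [List.length_take, List.length_drop, hq] at this
  omega

-- 2-token slice of B as a take/drop
theorem slice2_eq (tokens : List String) (k : Nat) :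
    PySem.List.slice tokens (some (k : Int)) (some ((k : Int) + 2)) = (tokens.drop k).take 2 := by
  have := PySem.List.slice_natCast_add tokens k 2
  simpa using this

theorem slice3_eq (tokens : List String) (k : Nat) :
    PySem.List.slice tokens (some (k : Int)) (some ((k : Int) + 3)) = (tokens.drop k).take 3 := by
  have := PySem.List.slice_natCast_add tokens k 3
  simpa using this

-- A computes Canon
theorem A_iff (tokens : List String) : has_modifier_py tokens = true ↔ Canon tokens := by
  unfold has_modifier_py Canon Match2 Match3
  split_ifs with hw
  · rw [List.any_eq_true] at hw
    simp only [true_iff]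
    exact Or.inl hw
  · rw [List.any_eq_true] at hw
    push Not at hw
    simp only [fpPhrases, List.any_cons, List.any_nil, Bool.or_eq_true, Bool.false_eq_true,
      or_false]
    rw [loop_eq_exists tokens ["up", "to"] (by decide),
      loop_eq_exists tokens ["at", "least"] (by decide),
      loop_eq_exists tokens ["at", "most"] (by decide),
      loop_eq_exists tokens ["no", "more", "than"] (by decide),
      loop_eq_exists tokens ["capped", "at"] (by decide)]
    simp only [List.length_cons, List.length_nil]
    constructor
    · intro h
      rcases h with h | h | h | h | h
      · exact Or.inr (Or.inl ⟨h.choose, Or.inl h.choose_spec⟩)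
      · exact Or.inr (Or.inl ⟨h.choose, Or.inr (Or.inl h.choose_spec)⟩)
      · exact Or.inr (Or.inl ⟨h.choose, Or.inr (Or.inr (Or.inl h.choose_spec))⟩)
      · exact Or.inr (Or.inr ⟨h.choose, h.choose_spec⟩)
      · exact Or.inr (Or.inl ⟨h.choose, Or.inr (Or.inr (Or.inr h.choose_spec))⟩)
    · intro h
      rcases h with ⟨t, ht, hc⟩ | ⟨i, h | h | h | h⟩ | ⟨i, h⟩
      · exact absurd hc (hw t ht)
      · exact Or.inl ⟨i, h⟩
      · exact Or.inr (Or.inl ⟨i, h⟩)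
      · exact Or.inr (Or.inr (Or.inl ⟨i, h⟩))
      · exact Or.inr (Or.inr (Or.inr (Or.inr ⟨i, h⟩)))
      · exact Or.inr (Or.inr (Or.inr (Or.inl ⟨i, h⟩)))

-- pointwise meaning of B's loop body at an in-range position
theorem B_body_iff (tokens : List String) (k : Nat) (hkn : k < tokens.length) :
    ((fpWords.contains (PySem.List.pyGetD tokens (k : Int) "")
      || fpPairs.contains (PySem.List.slice tokens (some (k : Int)) (some ((k : Int) + 2)))
      || fpTriples.contains (PySem.List.slice tokens (some (k : Int)) (some ((k : Int) + 3)))) = true) ↔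
      (fpWords.contains (tokens[k]'hkn) = true ∨ Match2 tokens k ∨ Match3 tokens k) := by
  rw [slice2_eq, slice3_eq, PySem.List.pyGetD_natCast, List.getD_eq_getElem _ _ hkn]
  simp only [Bool.or_eq_true, Match2, Match3, fpPairs, fpTriples]
  simp only [List.contains_cons, List.contains_nil, Bool.or_eq_true, beq_iff_eq,
    Bool.false_eq_true, or_false]
  tauto

-- B computes Canon
theorem B_iff (tokens : List String) : has_modifier_py_alt tokens = true ↔ Canon tokens := by
  unfold has_modifier_py_alt Canon
  rw [List.any_eq_true]
  constructor
  · rintro ⟨x, hx, hcond⟩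
    rw [PySem.List.mem_pyRange_one] at hx
    lift x to ℕ using hx.1 with k
    have hkn : k < tokens.length := by have := hx.2; omega
    rw [B_body_iff tokens k hkn] at hcond
    rcases hcond with hword | hm | hm
    · exact Or.inl ⟨tokens[k], List.getElem_mem hkn, hword⟩
    · exact Or.inr (Or.inl ⟨k, hm⟩)
    · exact Or.inr (Or.inr ⟨k, hm⟩)
  · intro h
    have key : ∃ k : Nat, ∃ hk : k < tokens.length,
        (fpWords.contains (tokens[k]'hk) = true ∨ Match2 tokens k ∨ Match3 tokens k) := by
      rcases h with ⟨t, ht, hc⟩ | ⟨i, hm⟩ | ⟨i, hm⟩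
      · obtain ⟨k, hk, hkt⟩ := List.mem_iff_getElem.mp ht
        exact ⟨k, hk, Or.inl (by rwa [hkt])⟩
      · have hib : i < tokens.length := by
          rcases hm with h2 | h2 | h2 | h2 <;>
            (have := take_eq_bound tokens _ 2 i h2 (by decide) (by decide); omega)
        exact ⟨i, hib, Or.inr (Or.inl hm)⟩
      · have hib : i < tokens.length := by
          have := take_eq_bound tokens _ 3 i hm (by decide) (by decide)
          omega
        exact ⟨i, hib, Or.inr (Or.inr hm)⟩
    obtain ⟨k, hkn, hk⟩ := key
    refine ⟨(k : Int), ?_, ?_⟩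
    · rw [PySem.List.mem_pyRange_one]
      constructor
      · positivity
      · omega
    · rw [B_body_iff tokens k hkn]
      exact hk

-- ===== VERDICT (by name: the statement is the Claim_ definition above) =====
theorem has_modifier_py_spec : Claim_equal_has_modifier_py := by
  intro tokens _
  unfold Spec_has_modifier_py
  rw [Bool.eq_iff_iff, A_iff, B_iff]
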